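-- pv_equiv track=rewrite | github.com/yasufumi-nakata/Pytra | src/toolchain/emit/cpp/emitter/header_builder.py | _extract_class_name_from_header
-- ===== SOURCE A (Python) =====
-- def _extract_class_name_from_header(line: str) -> str:
--     stripped = line.strip()
--     if stripped.startswith("struct "):
--         tail = stripped[7:]
--     elif stripped.startswith("class "):
--         tail = stripped[6:]
--     else:
--         return ""
--     name = ""
--     for ch in tail:
--         if (ch >= "A" and ch <= "Z") or (ch >= "a" and ch <= "z") or (ch >= "0" and ch <= "9") or ch == "_":
--             name += ch
--         else:
--             break
--     return name
-- ===== SOURCE B (Python) =====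
-- _KEYWORDS = ("struct ", "class ")
--
--
-- def _is_word_char(ch):
--     return ch == "_" or "A" <= ch <= "Z" or "a" <= ch <= "z" or "0" <= ch <= "9"
--
--
-- def _extract_class_name_from_header(line: str) -> str:
--     stripped = line.strip()
--     for kw in _KEYWORDS:
--         if stripped.startswith(kw):
--             tail = stripped[len(kw):]
--             n = 0
--             while n < len(tail) and _is_word_char(tail[n]):
--                 n += 1
--             return tail[:n]
--     return ""
-- ===== Notes on version B (the rewrite author's own statement) =====
-- stated objective: alternative
-- what changed: Replaces the if/elif prefix chain plus character-by-character string accumulation with a loop over a keyword table that computes the word-prefix length and returns one slice tail[:n].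
import Mathlib
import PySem

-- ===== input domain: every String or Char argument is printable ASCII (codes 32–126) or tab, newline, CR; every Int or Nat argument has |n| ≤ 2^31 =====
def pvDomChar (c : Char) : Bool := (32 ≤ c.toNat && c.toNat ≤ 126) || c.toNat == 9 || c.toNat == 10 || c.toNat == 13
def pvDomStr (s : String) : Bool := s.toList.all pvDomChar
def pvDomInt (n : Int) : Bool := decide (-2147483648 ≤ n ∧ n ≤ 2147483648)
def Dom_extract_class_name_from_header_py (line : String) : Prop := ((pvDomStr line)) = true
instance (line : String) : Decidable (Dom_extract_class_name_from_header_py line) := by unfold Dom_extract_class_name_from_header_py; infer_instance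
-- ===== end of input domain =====

-- B replaces A's if/elif prefix chain and char-by-char accumulator with a keyword-table loop
-- that computes the word-prefix length and returns a single slice (alternative decomposition).

-- ===== PORT A =====
-- the 'for ch in tail: … break' accumulator loop of A
def pvLoopA : List Char → String → String
  | [], name => name
  | ch :: rest, name =>
    if (ch ≥ 'A' ∧ ch ≤ 'Z') ∨ (ch ≥ 'a' ∧ ch ≤ 'z') ∨ (ch ≥ '0' ∧ ch ≤ '9') ∨ ch = '_' then
      pvLoopA rest (name.push ch)
    else name

def extract_class_name_from_header_py (line : String) : String :=
  let stripped := PySem.Str.strip line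
  if PySem.Str.startswith stripped "struct " then
    pvLoopA (PySem.Str.slice stripped (some 7) none).toList ""
  else if PySem.Str.startswith stripped "class " then
    pvLoopA (PySem.Str.slice stripped (some 6) none).toList ""
  else ""

-- ===== PORT B =====
def pvIsWordChar (ch : Char) : Bool :=
  decide (ch = '_' ∨ ('A' ≤ ch ∧ ch ≤ 'Z') ∨ ('a' ≤ ch ∧ ch ≤ 'z') ∨ ('0' ≤ ch ∧ ch ≤ '9'))

-- the 'while n < len(tail) and _is_word_char(tail[n])' counter of B
def pvWordLen : List Char → Nat
  | [] => 0
  | ch :: rest => if pvIsWordChar ch then pvWordLen rest + 1 else 0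

-- the 'for kw in _KEYWORDS' loop of B
def pvTryKeywords (stripped : String) : List String → String
  | [] => ""
  | kw :: rest =>
    if PySem.Str.startswith stripped kw then
      let tail := (PySem.Str.slice stripped (some (PySem.Str.len kw)) none).toList
      String.ofList (tail.take (pvWordLen tail))
    else pvTryKeywords stripped rest

def extract_class_name_from_header_py_alt (line : String) : String :=
  pvTryKeywords (PySem.Str.strip line) ["struct ", "class "]

-- ===== PRECONDITION & SPEC =====
def Spec_extract_class_name_from_header_py (line : String) (out : String) : Prop := out = extract_class_name_from_header_py_alt line
instance (line : String) (out : String) : Decidable (Spec_extract_class_name_from_header_py line out) := by unfold Spec_extract_class_name_from_header_py; infer_instance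

-- ===== CLAIM (what is proved, stated in full; the proofs are below) =====
def Claim_equal_extract_class_name_from_header_py : Prop := ∀ (line : String), Dom_extract_class_name_from_header_py line → Spec_extract_class_name_from_header_py line (extract_class_name_from_header_py line)

-- ===== LEMMAS AND PROOFS =====

theorem pvLoopA_eq_take (l : List Char) (s : String) :
    pvLoopA l s = s ++ String.ofList (l.take (pvWordLen l)) := by
  induction l generalizing s with
  | nil =>
    apply String.toList_injective
    simp [pvLoopA, pvWordLen]
  | cons ch rest ih =>
    by_cases h : (ch ≥ 'A' ∧ ch ≤ 'Z') ∨ (ch ≥ 'a' ∧ ch ≤ 'z') ∨ (ch ≥ '0' ∧ ch ≤ '9') ∨ ch = '_'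
    · have hw : pvIsWordChar ch = true := by
        simp only [pvIsWordChar, decide_eq_true_eq]; tauto
      rw [pvLoopA, if_pos h, ih, pvWordLen, if_pos hw]
      apply String.toList_injective
      simp
    · have hw : pvIsWordChar ch = false := by
        simp only [pvIsWordChar, decide_eq_false_iff_not]
        intro hc; exact h (by tauto)
      rw [pvLoopA, if_neg h, pvWordLen, if_neg (by simp [hw])]
      apply String.toList_injective
      simp

-- ===== VERDICT (by name: the statement is the Claim_ definition above) =====
theorem extract_class_name_from_header_py_spec : Claim_equal_extract_class_name_from_header_py := by
  intro line _
  show _ = _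
  unfold extract_class_name_from_header_py extract_class_name_from_header_py_alt
  simp only [pvTryKeywords]
  simp [pvLoopA_eq_take]
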